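-- pv_equiv track=rewrite | github.com/rstierli/fortianalyzer-mcp | src/fortianalyzer_mcp/tools/log_tools.py | _build_exact_slice_day_candidates
-- ===== SOURCE A (Python) =====
-- def _build_exact_slice_day_candidates(preferred_slice_days: int) -> list[int]:
--     """Build descending exact slice-day candidates ending at 1 day."""
--     days = max(preferred_slice_days, 1)
--     candidates = []
--     while days > 1:
--         candidates.append(days)
--         next_days = max(days // 2, 1)
--         if next_days == days:
--             break
--         days = next_days
--     candidates.append(1)
--     return list(dict.fromkeys(candidates))
-- ===== SOURCE B (Python) =====
-- def _build_exact_slice_day_candidates(preferred_slice_days: int) -> list[int]: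
--     """Build descending exact slice-day candidates ending at 1 day.
--
--     Reconstructs the candidates from the binary representation of days:
--     each binary prefix of days, grown by doubling, is one candidate; the
--     list is built back-to-front, so no halving loop and no dedup is needed.
--     """
--     days = max(preferred_slice_days, 1)
--     out = []
--     v = 0
--     for bit in bin(days)[2:]:
--         v = 2 * v + (bit == '1')
--         out = [v] + out
--     return out
-- ===== Notes on version B (the rewrite author's own statement) =====
-- stated objective: alternative
-- what changed: Instead of A's halving while-loop with break and dict-based dedup, B reconstructs the candidates from the binary representation of days (bin(days)[2:]), doubling an accumulator per bit and prepending each prefix value, building the descending list back-to-front with no division and no dedup.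
import Mathlib
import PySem

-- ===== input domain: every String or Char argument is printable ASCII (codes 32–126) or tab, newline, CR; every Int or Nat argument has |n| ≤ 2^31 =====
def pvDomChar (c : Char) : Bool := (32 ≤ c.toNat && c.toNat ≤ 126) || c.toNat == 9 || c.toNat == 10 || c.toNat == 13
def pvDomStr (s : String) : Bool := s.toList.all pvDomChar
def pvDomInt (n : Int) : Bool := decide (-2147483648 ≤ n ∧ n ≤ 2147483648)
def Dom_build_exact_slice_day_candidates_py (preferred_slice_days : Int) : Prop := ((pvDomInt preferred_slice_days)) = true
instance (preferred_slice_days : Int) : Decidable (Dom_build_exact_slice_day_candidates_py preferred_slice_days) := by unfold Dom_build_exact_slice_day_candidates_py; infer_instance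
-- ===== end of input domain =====

-- B rebuilds the candidates from the binary digits of days by doubling an accumulator
-- and prepending, instead of A's halving while-loop with dedup; objective: alternative.

-- ===== PORT A =====
-- the while-loop of A, collecting `candidates` before the final append of 1
def pvALoop (days : Int) : List Int :=
  if h : days > 1 then
    if hb : max (PySem.Int.floordiv days 2) 1 = days then [days]
    else days :: pvALoop (max (PySem.Int.floordiv days 2) 1)
  else []
termination_by days.toNat
decreasing_by
  have h2 : PySem.Int.floordiv days 2 = days / 2 :=
    PySem.Int.floordiv_eq_ediv_of_pos (by omega)
  rw [h2] at hb ⊢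
  omega

def build_exact_slice_day_candidates_py (preferred_slice_days : Int) : List Int :=
  PySem.List.dedup (pvALoop (max preferred_slice_days 1) ++ [1])

-- ===== PORT B =====
-- hand port of bin(days)[2:]: the binary digits of days, most significant first
-- (exact for days ≥ 1, the only case B reaches)
def pvBits (n : Nat) : List Int :=
  if n = 0 then [] else pvBits (n / 2) ++ [((n % 2 : Nat) : Int)]

def build_exact_slice_day_candidates_py_alt (preferred_slice_days : Int) : List Int :=
  let days := max preferred_slice_days 1
  ((pvBits days.toNat).foldl
    (fun (s : Int × List Int) b => (2 * s.1 + b, (2 * s.1 + b) :: s.2)) (0, [])).2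

-- ===== PRECONDITION & SPEC =====
def Spec_build_exact_slice_day_candidates_py (preferred_slice_days : Int) (out : List Int) : Prop := out = build_exact_slice_day_candidates_py_alt preferred_slice_days
instance (preferred_slice_days : Int) (out : List Int) : Decidable (Spec_build_exact_slice_day_candidates_py preferred_slice_days out) := by unfold Spec_build_exact_slice_day_candidates_py; infer_instance

-- ===== CLAIM (what is proved, stated in full; the proofs are below) =====
def Claim_equal_build_exact_slice_day_candidates_py : Prop := ∀ (preferred_slice_days : Int), Dom_build_exact_slice_day_candidates_py preferred_slice_days → Spec_build_exact_slice_day_candidates_py preferred_slice_days (build_exact_slice_day_candidates_py preferred_slice_days)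

-- ===== LEMMAS AND PROOFS =====

-- shifting one more is shifting the floor half
lemma pv_shift_succ (d : Int) (i : Nat) :
    d >>> (i + 1) = (d / 2) >>> i := by
  simp only [Int.shiftRight_eq_div_pow]
  push_cast
  rw [pow_succ, mul_comm, ← Int.ediv_ediv_of_nonneg (by norm_num : (0:Int) ≤ 2)]

-- within the bit-length, later shifts are strictly smaller
lemma pv_shift_lt (d : Int) (hd : 1 ≤ d) {i j : Nat} (hij : i < j)
    (hj : j < PySem.Int.bitLength d) : d >>> j < d >>> i := by
  simp only [Int.shiftRight_eq_div_pow]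
  push_cast
  have hpi : (0:Int) < 2 ^ i := by positivity
  have hpj : (0:Int) < 2 ^ j := by positivity
  have ha : (1:Int) ≤ d / 2 ^ j := by
    rw [Int.le_ediv_iff_mul_le hpj, one_mul]
    have h1 : (2:Nat) ^ j ≤ 2 ^ (PySem.Int.bitLength d - 1) :=
      Nat.pow_le_pow_right (by norm_num) (by omega)
    have h2 := PySem.Int.two_pow_bitLength_le d (by omega)
    have h3 : d.natAbs = d.toNat := by omega
    have : (2:Nat) ^ j ≤ d.toNat := by omega
    exact_mod_cast le_trans (by exact_mod_cast this) (by omega : ((d.toNat : Int)) ≤ d)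
  set a : Int := d / 2 ^ j with haj
  have hmul : a * 2 ^ j ≤ d := Int.ediv_mul_le d (by positivity)
  have hle : 2 * a ≤ d / 2 ^ i := by
    rw [Int.le_ediv_iff_mul_le hpi]
    calc 2 * a * 2 ^ i = a * 2 ^ (i + 1) := by ring
    _ ≤ a * 2 ^ j := by
        apply mul_le_mul_of_nonneg_left _ (by omega)
        exact pow_le_pow_right₀ (by norm_num) (by omega)
    _ ≤ d := hmul
  omega

-- the common characterisation both ports are reduced to
def pvShiftMap (d : Int) : List Int :=
  (List.range (PySem.Int.bitLength d)).map (fun i : Nat => d >>> i)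

-- A's loop plus the final 1 is the shift list
lemma pv_aloop_eq (d : Int) (hd : 1 ≤ d) :
    pvALoop d ++ ([1] : List Int) = pvShiftMap d := by
  have H : ∀ n : Nat, ∀ d : Int, 1 ≤ d → d.toNat = n →
      pvALoop d ++ ([1] : List Int) = pvShiftMap d := by
    intro n
    induction n using Nat.strong_induction_on with
    | _ n ih =>
      intro d hd hn
      by_cases h1 : d > 1
      · have hfd : PySem.Int.floordiv d 2 = d / 2 :=
          PySem.Int.floordiv_eq_ediv_of_pos (by omega)
        have hmax : max (PySem.Int.floordiv d 2) 1 = d / 2 := by rw [hfd]; omega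
        have hne : d / 2 ≠ d := by omega
        rw [pvALoop, dif_pos h1, hmax, dif_neg hne, List.cons_append,
          ih (d / 2).toNat (by omega) (d / 2) (by omega) rfl]
        unfold pvShiftMap
        rw [PySem.Int.bitLength_of_pos (by omega : (0:Int) < d), hfd,
          List.range_succ_eq_map, List.map_cons, List.map_map]
        have hcomp : ∀ i : Nat, ((fun i : Nat => d >>> i) ∘ Nat.succ) i = (d / 2) >>> i := by
          intro i
          show d >>> (i + 1) = (d / 2) >>> i
          exact pv_shift_succ d i
        simp only [Int.shiftRight_zero]
        exact congrArg (d :: ·) (List.map_congr_left fun i _ => (hcomp i).symm)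
      · have hd1 : d = 1 := by omega
        subst hd1
        rw [pvALoop]
        decide
  exact H d.toNat d hd rfl

lemma pv_rhs_nodup (d : Int) (hd : 1 ≤ d) : (pvShiftMap d).Nodup := by
  apply List.Nodup.map_on _ List.nodup_range
  intro i hi j hj hEq
  rw [List.mem_range] at hi hj
  rcases Nat.lt_trichotomy i j with h | h | h
  · exact absurd hEq (ne_of_gt (pv_shift_lt d hd h hj))
  · exact h
  · exact absurd hEq (ne_of_lt (pv_shift_lt d hd h hi))

-- B's doubling fold over the binary digits produces (days, the shift list)
lemma pv_fold_bits : ∀ n : Nat, 0 < n →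
    (pvBits n).foldl
      (fun (s : Int × List Int) b => (2 * s.1 + b, (2 * s.1 + b) :: s.2)) (0, [])
      = ((n : Int), pvShiftMap (n : Int)) := by
  intro n
  induction n using Nat.strong_induction_on with
  | _ n ih =>
    intro hn
    by_cases h1 : n = 1
    · subst h1
      rw [pvBits, pvBits]
      decide
    · have h2 : 2 ≤ n := by omega
      rw [pvBits, if_neg (by omega), List.foldl_append,
        ih (n / 2) (by omega) (by omega)]
      simp only [List.foldl_cons, List.foldl_nil]
      have hv : 2 * ((n / 2 : Nat) : Int) + ((n % 2 : Nat) : Int) = (n : Int) := by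
        push_cast [Nat.div_add_mod]
        omega
      rw [hv]
      refine Prod.ext rfl ?_
      show (n : Int) :: pvShiftMap ((n / 2 : Nat) : Int) = pvShiftMap (n : Int)
      unfold pvShiftMap
      rw [PySem.Int.bitLength_natCast hn, List.range_succ_eq_map,
        List.map_cons, List.map_map]
      simp only [Int.shiftRight_zero]
      refine congrArg ((n : Int) :: ·) ?_
      refine List.map_congr_left fun i _ => ?_
      show ((n / 2 : Nat) : Int) >>> i = (n : Int) >>> (i + 1)
      rw [pv_shift_succ]
      congr 1

-- ===== VERDICT (by name: the statement is the Claim_ definition above) =====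
theorem build_exact_slice_day_candidates_py_spec : Claim_equal_build_exact_slice_day_candidates_py := by
  intro p _
  unfold Spec_build_exact_slice_day_candidates_py
  have hd : (1 : Int) ≤ max p 1 := le_max_right _ _
  show PySem.List.dedup (pvALoop (max p 1) ++ [1]) =
    ((pvBits (max p 1).toNat).foldl
      (fun (s : Int × List Int) b => (2 * s.1 + b, (2 * s.1 + b) :: s.2)) (0, [])).2
  have hcast : (((max p 1).toNat : Int)) = max p 1 := by omega
  rw [pv_fold_bits (max p 1).toNat (by omega), hcast]
  rw [pv_aloop_eq _ hd, PySem.List.dedup_eq_ofList]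
  exact PySem.Set.ofList_eq_self_of_nodup _ (pv_rhs_nodup _ hd)
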